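-- pv_equiv track=rewrite | github.com/lukeclimen/AdventOfCode | 2022/Day_1/Day1Part2.py | getElf
-- ===== SOURCE A (Python) =====
-- def getElf(calorieArray):
--     """Iterates through array, returning
--     the 3 maximum values"""
--
--     mostCals = 0
--     secondMost = 0
--     thirdMost = 0
--
--     # Iterate through the calorie array
--     for element in calorieArray:
--         # Replacing the top elf
--         if element > mostCals:
--             thirdMost = secondMost
--             secondMost = mostCals
--             mostCals = element
--
--         # Replacing the second from top elf
--         elif element > secondMost:
--             thirdMost = secondMost
--             secondMost = element
--
--         # Replacing the third from top elf
--         elif element > thirdMost: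
--             thirdMost = element
--
--     return mostCals + secondMost + thirdMost
-- ===== SOURCE B (Python) =====
-- def getElf(calorieArray):
--     """Sum of the three largest values, floored at zero: sort the
--     zero-padded list descending and sum its first three elements."""
--     top = sorted(list(calorieArray) + [0, 0, 0], reverse=True)
--     return sum(top[:3])
-- ===== Notes on version B (the rewrite author's own statement) =====
-- stated objective: idiomatic
-- what changed: Replaced A's single-pass hand-maintained top-three accumulator variables with sorting the zero-padded list descending and summing its first three elements.
import Mathlib
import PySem

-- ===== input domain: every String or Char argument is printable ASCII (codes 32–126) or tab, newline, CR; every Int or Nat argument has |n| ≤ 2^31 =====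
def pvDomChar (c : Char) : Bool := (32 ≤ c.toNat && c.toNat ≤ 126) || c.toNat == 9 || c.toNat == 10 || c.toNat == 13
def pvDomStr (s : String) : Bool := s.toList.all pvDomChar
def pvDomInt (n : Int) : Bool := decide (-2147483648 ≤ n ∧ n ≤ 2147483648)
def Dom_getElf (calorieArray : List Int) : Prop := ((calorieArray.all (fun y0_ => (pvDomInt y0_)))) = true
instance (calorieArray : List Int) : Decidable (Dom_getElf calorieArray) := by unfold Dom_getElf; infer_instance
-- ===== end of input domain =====

-- B replaces A's hand-maintained top-three accumulators by sorting the zero-padded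
-- list descending and summing its first three elements (objective: idiomatic).

-- ===== PORT A =====
-- A's loop state (mostCals, secondMost, thirdMost), one fold step per element.
def getElfStep (st : Int × Int × Int) (element : Int) : Int × Int × Int :=
  if element > st.1 then (element, st.1, st.2.1)
  else if element > st.2.1 then (st.1, element, st.2.1)
  else if element > st.2.2 then (st.1, st.2.1, element)
  else st

def getElf (calorieArray : List Int) : Int :=
  let st := calorieArray.foldl getElfStep (0, 0, 0)
  st.1 + st.2.1 + st.2.2

-- ===== PORT B =====
def getElf_alt (calorieArray : List Int) : Int :=
  let top := PySem.List.sorted (calorieArray ++ [0, 0, 0]) (fun x => x) true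
  (PySem.List.slice top none (some 3)).sum

-- ===== PRECONDITION & SPEC =====
def Spec_getElf (calorieArray : List Int) (out : Int) : Prop := out = getElf_alt calorieArray
instance (calorieArray : List Int) (out : Int) : Decidable (Spec_getElf calorieArray out) := by unfold Spec_getElf; infer_instance

-- ===== CLAIM (what is proved, stated in full; the proofs are below) =====
def Claim_equal_getElf : Prop := ∀ (calorieArray : List Int), Dom_getElf calorieArray → Spec_getElf calorieArray (getElf calorieArray)

-- ===== LEMMAS AND PROOFS =====

-- Descending insertion sort of an Int list (proof-side reference for Python's sorted(..., reverse=True)).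
def sortD (m : List Int) : List Int := List.insertionSort (fun p q : Int => q ≤ p) m

theorem sortD_pairwise (m : List Int) :
    List.Pairwise (fun p q : Int => q ≤ p) (sortD m) :=
  @List.pairwise_insertionSort Int (fun p q : Int => q ≤ p) _
    ⟨fun a b => le_total b a⟩ ⟨fun _ _ _ h1 h2 => le_trans h2 h1⟩ m

theorem descEq {l₁ l₂ : List Int}
    (h₁ : List.Pairwise (fun p q : Int => q ≤ p) l₁)
    (h₂ : List.Pairwise (fun p q : Int => q ≤ p) l₂)
    (hp : l₁.Perm l₂) : l₁ = l₂ :=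
  List.eq_of_perm_of_sorted (fun _ _ _ _ hab hba => le_antisymm hba hab) h₁ h₂ hp

-- sortD depends only on the multiset of elements.
theorem sortD_perm_inv {m₁ m₂ : List Int} (h : m₁.Perm m₂) : sortD m₁ = sortD m₂ :=
  descEq (sortD_pairwise m₁) (sortD_pairwise m₂)
    (((List.perm_insertionSort _ m₁).trans h).trans (List.perm_insertionSort _ m₂).symm)

-- PySem's reverse sort of Ints is sortD.
theorem pysorted_eq_sortD (m : List Int) :
    PySem.List.sorted m (fun x => x) true = sortD m :=
  descEq (PySem.List.sorted_pairwise_rev m _) (sortD_pairwise m)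
    ((PySem.List.sorted_perm m _ true).trans (List.perm_insertionSort _ m).symm)

-- Inserting x into a descending list changes its first three exactly as A's step does.
theorem take3_orderedInsert (x a b c : Int) (t : List Int) (hab : b ≤ a) (hbc : c ≤ b) :
    (List.orderedInsert (fun p q : Int => q ≤ p) x (a :: b :: c :: t)).take 3 =
      (fun st => [st.1, st.2.1, st.2.2]) (getElfStep (a, b, c) x) := by
  simp only [List.orderedInsert, getElfStep]
  split_ifs <;> simp_all <;> omega

-- Invariant of A's fold: its state is the first three of the zero-padded descending sort.
theorem getElf_invariant (l : List Int) :
    (sortD (l ++ [0, 0, 0])).take 3 =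
      (fun st => [st.1, st.2.1, st.2.2]) (l.foldl getElfStep (0, 0, 0)) := by
  induction l using List.reverseRecOn with
  | nil => rfl
  | append_singleton l x ih =>
    have hperm : ((l ++ [x]) ++ [0, 0, 0]).Perm (x :: (l ++ [0, 0, 0])) := by
      simpa using (List.perm_append_comm (l₁ := l) (l₂ := [x])).append_right [(0:Int),0,0]
        |>.trans (by simp)
    rw [sortD_perm_inv hperm]
    have hlen : 3 ≤ (sortD (l ++ [0, 0, 0])).length := by
      have := (List.perm_insertionSort (fun p q : Int => q ≤ p) (l ++ [0,0,0])).length_eq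
      simp [sortD, this]
    obtain ⟨a, b, c, t, hs⟩ : ∃ a b c t, sortD (l ++ [0, 0, 0]) = a :: b :: c :: t := by
      rcases hsD : sortD (l ++ [0, 0, 0]) with _ | ⟨a, _ | ⟨b, _ | ⟨c, t⟩⟩⟩ <;>
        simp_all
    have hpw := sortD_pairwise (l ++ [0, 0, 0])
    rw [hs] at hpw
    have hab : b ≤ a := (List.pairwise_cons.mp hpw).1 b (by simp)
    have hbc : c ≤ b := (List.pairwise_cons.mp (List.pairwise_cons.mp hpw).2).1 c (by simp)
    have hins : sortD (x :: (l ++ [0, 0, 0])) =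
        List.orderedInsert (fun p q : Int => q ≤ p) x (sortD (l ++ [0, 0, 0])) := rfl
    rw [hins, hs, take3_orderedInsert x a b c t hab hbc, List.foldl_append]
    have := ih
    rw [hs] at this
    simp only [List.take] at this
    obtain ⟨h1, h2, h3⟩ : a = (l.foldl getElfStep (0,0,0)).1 ∧
        b = (l.foldl getElfStep (0,0,0)).2.1 ∧ c = (l.foldl getElfStep (0,0,0)).2.2 := by
      simpa using this
    simp [h1, h2, h3]

-- ===== VERDICT (by name: the statement is the Claim_ definition above) =====
theorem getElf_spec : Claim_equal_getElf := by
  intro l _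
  simp only [Spec_getElf, getElf, getElf_alt]
  rw [pysorted_eq_sortD]
  rw [show ((3:Int) = ((3:Nat):Int)) from rfl, PySem.List.slice_to_natCast]
  rw [getElf_invariant l]
  simp
  ring
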